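-- pv_equiv track=rewrite | github.com/LUUUUUUZ/MACNet | srs/utils/data/collate.py | _factorize_sequences
-- ===== SOURCE A (Python) =====
-- def _factorize_sequences(seqs, new_iids):
--     """
--     Factorizes sequences into new ID space.
--     """
--     cur_idx = 0
--     new_seqs = []
--     for seq in seqs:
--         new_seq = new_iids[cur_idx:cur_idx + len(seq)]
--         cur_idx += len(seq)
--         new_seqs.append(new_seq)
--     return new_seqs
-- ===== SOURCE B (Python) =====
-- def _factorize_sequences(seqs, new_iids):
--     """
--     Factorizes sequences into new ID space.
--     """
--     ids = iter(new_iids)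
--     return [[x for _, x in zip(seq, ids)] for seq in seqs]
-- ===== Notes on version B (the rewrite author's own statement) =====
-- stated objective: idiomatic
-- what changed: No index arithmetic or slicing at all: a single shared iterator over the flat IDs is consumed chunk by chunk, each chunk drawn by zipping the sequence with the iterator.
import Mathlib
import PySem

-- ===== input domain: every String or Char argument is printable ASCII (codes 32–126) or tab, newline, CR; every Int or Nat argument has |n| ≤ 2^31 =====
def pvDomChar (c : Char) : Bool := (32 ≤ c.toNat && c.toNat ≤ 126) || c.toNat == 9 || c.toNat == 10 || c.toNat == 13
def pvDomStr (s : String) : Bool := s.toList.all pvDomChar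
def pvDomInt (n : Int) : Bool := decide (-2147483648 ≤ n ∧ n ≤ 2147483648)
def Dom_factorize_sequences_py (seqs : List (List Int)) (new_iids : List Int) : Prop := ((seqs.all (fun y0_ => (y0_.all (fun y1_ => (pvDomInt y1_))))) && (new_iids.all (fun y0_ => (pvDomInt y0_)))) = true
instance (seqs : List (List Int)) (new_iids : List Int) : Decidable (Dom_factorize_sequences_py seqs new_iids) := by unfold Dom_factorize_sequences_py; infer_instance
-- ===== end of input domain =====

-- B: consumes a shared iterator over the flat IDs by zipping each sequence with it — no indices, no slices (idiomatic decomposition).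


-- ===== PORT A =====
def factorize_sequences_py (seqs : List (List Int)) (new_iids : List Int) : List (List Int) :=
  -- cur_idx = 0; new_seqs = []; for seq in seqs: slice, advance, append
  (seqs.foldl
    (fun (st : Int × List (List Int)) (seq : List Int) =>
      (st.1 + (seq.length : Int),
       st.2 ++ [PySem.List.slice new_iids (some st.1) (some (st.1 + (seq.length : Int)))]))
    ((0 : Int), ([] : List (List Int)))).2

-- ===== PORT B =====
-- the shared Python iterator is the 'rem' list threaded through the recursion;
-- zip(seq, ids) draws min(len seq, len rem) elements, i.e. consumes rem.drop seq.length
def altGo (seqs : List (List Int)) (rem : List Int) : List (List Int) :=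
  match seqs with
  | [] => []
  | s :: ss => ((s.zip rem).map Prod.snd) :: altGo ss (rem.drop s.length)

def factorize_sequences_py_alt (seqs : List (List Int)) (new_iids : List Int) : List (List Int) :=
  altGo seqs new_iids

-- ===== PRECONDITION & SPEC =====
def Spec_factorize_sequences_py (seqs : List (List Int)) (new_iids : List Int) (out : List (List Int)) : Prop := out = factorize_sequences_py_alt seqs new_iids
instance (seqs : List (List Int)) (new_iids : List Int) (out : List (List Int)) : Decidable (Spec_factorize_sequences_py seqs new_iids out) := by unfold Spec_factorize_sequences_py; infer_instance

-- ===== CLAIM =====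
def Claim_equal_factorize_sequences_py : Prop := ∀ (seqs : List (List Int)) (new_iids : List Int), Dom_factorize_sequences_py seqs new_iids → Spec_factorize_sequences_py seqs new_iids (factorize_sequences_py seqs new_iids)

-- ===== LEMMAS AND PROOFS =====

-- zipping a list with rem and projecting the second components takes len elements of rem
theorem zip_snd_take (s : List Int) (rem : List Int) :
    (s.zip rem).map Prod.snd = rem.take s.length := by
  induction s generalizing rem with
  | nil => simp
  | cons a as ih =>
    cases rem with
    | nil => simp
    | cons b bs => simp [List.zip_cons_cons, ih]

-- A's fold starting at offset n equals acc ++ B's recursion on the remaining IDs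
theorem fs_aux (new_iids : List Int) :
    ∀ (seqs : List (List Int)) (n : Nat) (acc : List (List Int)),
    (seqs.foldl
      (fun (st : Int × List (List Int)) (seq : List Int) =>
        (st.1 + (seq.length : Int),
         st.2 ++ [PySem.List.slice new_iids (some st.1) (some (st.1 + (seq.length : Int)))]))
      ((n : Int), acc)).2 =
    acc ++ altGo seqs (new_iids.drop n) := by
  intro seqs
  induction seqs with
  | nil => intro n acc; simp [altGo]
  | cons s ss ih =>
    intro n acc
    simp only [List.foldl]
    have hc : ((n : Int) + (s.length : Int)) = ((n + s.length : Nat) : Int) := by push_cast; ring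
    rw [hc, ih (n + s.length)]
    simp [altGo, PySem.List.slice_natCast_add, zip_snd_take, List.drop_drop]

-- ===== VERDICT =====
theorem factorize_sequences_py_spec : Claim_equal_factorize_sequences_py := by
  intro seqs new_iids _
  unfold Spec_factorize_sequences_py factorize_sequences_py factorize_sequences_py_alt
  have := fs_aux new_iids seqs 0 []
  simpa using this
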